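-- pv_equiv track=rewrite | github.com/pengr97/SlideingWindow-protocol | hostA.py | addChecksum
-- ===== SOURCE A (Python) =====
-- def addChecksum(dataStr):
--     # 如果长度不是4的倍数，则在末尾添0
--     binStr = ''.join([bin(ord(c))[2:] for c in dataStr])    # 将数据转为二进制
--
--     if len(binStr) % 4 != 0:    # 如果长度不是4的整数倍，则填零到4的倍数
--         l = 4 - len(binStr) % 4
--         binStr = binStr + l * '0'
--
--     # 每四位划分为一个数，转为整数，相加得到和
--     a_array = []
--     for i in range(0, len(binStr), 4):
--         a_array.append(int(binStr[i:i + 4], 2))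
--
--     array_sum = sum(a_array)    # 求和
--
--     checksum = 0    # 校验和
--
--     while True: # 循环求取校验和
--         checksum = 0
--
--         shang = array_sum // 16 # 商
--         yushu = array_sum % 16  # 余数
--
--         checksum += yushu   # 将每一次的余数加到当前校验和中
--
--         while shang > 0:    # 当商大于0时继续
--             array_sum = shang
--             shang = array_sum // 16
--             yushu = array_sum % 16
--
--             checksum += yushu
--
--         if checksum < 16:   # 若小于16则说明位数小于等于4位，停止计算，否则将高位折回继续求和
--             break
--         else:
--             array_sum = checksum
--
--     checksum = bin(checksum ^ 15)[2:]  # 取反，并转化为二进制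
--     if len(checksum) != 4:
--         checksum = (4 - len(checksum))*'0'+checksum
--
--     return dataStr + checksum   # 返回添加了校验和的数据
-- ===== SOURCE B (Python) =====
-- def addChecksum(dataStr):
--     # Build the concatenated binary representation as one big integer (plus its
--     # total bit-length) instead of a character string, then sum its hex digits
--     # and take the base-16 digital root in closed form.
--     n = 0
--     length = 0
--     for c in dataStr:
--         b = ord(c).bit_length()
--         n = (n << b) | ord(c)
--         length += b
--     pad = (4 - length % 4) % 4      # pad trailing zeros to a multiple of 4 bits
--     n <<= pad
--     s = 0
--     while n:                        # sum of base-16 digits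
--         s += n & 15
--         n >>= 4
--     checksum = 0 if s == 0 else 1 + (s - 1) % 15   # base-16 digital root
--     return dataStr + format(checksum ^ 15, '04b')
-- ===== Notes on version B (the rewrite author's own statement) =====
-- stated objective: alternative
-- what changed: B replaces A's binary-character-string chunking (build bit string, slice into 4-char pieces, int(x,2) each, then two nested carry-fold while-loops) by pure integer arithmetic: it accumulates the concatenated bits into one big integer with shifts, sums its base-16 digits in one loop, and takes the base-16 digital root in closed form 1+(s-1)%15 instead of the nested folding loops.
import Mathlib
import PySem

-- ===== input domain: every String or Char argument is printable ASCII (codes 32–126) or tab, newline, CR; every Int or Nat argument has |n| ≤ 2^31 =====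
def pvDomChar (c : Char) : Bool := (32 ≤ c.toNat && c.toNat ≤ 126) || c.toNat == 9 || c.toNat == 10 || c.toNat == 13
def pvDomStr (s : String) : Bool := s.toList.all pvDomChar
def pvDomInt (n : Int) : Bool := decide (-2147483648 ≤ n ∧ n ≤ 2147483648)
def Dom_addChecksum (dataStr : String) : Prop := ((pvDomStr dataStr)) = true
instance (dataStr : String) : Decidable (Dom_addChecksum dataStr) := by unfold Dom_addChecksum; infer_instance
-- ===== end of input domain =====

-- One line: B builds the concatenated bit pattern as one big integer and takes the
-- base-16 digital root in closed form instead of A's string chunking and nested folding loops.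

-- ===== PORT A =====
-- inner 'while shang > 0' loop of A: adds the base-16 digits of shang to checksum
-- inner 'while shang > 0' loop of A: adds the base-16 digits of shang to checksum.
-- Structural recursion on a fuel counter; shang.toNat bounds the iteration count
-- (each pass replaces a positive shang by shang // 16 < shang), so the loop always
-- stops on its own guard and the fuel only makes the same computation total.
def innerAGo : Nat → Int → Int → Int
  | 0, _, checksum => checksum
  | fuel + 1, shang, checksum =>
    if shang > 0 then
      innerAGo fuel (PySem.Int.floordiv shang 16) (checksum + PySem.Int.mod shang 16)
    else checksum

def innerA (shang checksum : Int) : Int := innerAGo shang.toNat shang checksum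

-- outer 'while True' loop of A: refold until the digit sum is a single base-16 digit.
-- Fuel n.toNat + 1 bounds the iteration count: when the loop continues, the refolded
-- value (the digit sum) is strictly smaller, so it exits on its own break.
def outerAGo : Nat → Int → Int
  | 0, _ => 0
  | fuel + 1, n =>
    let c := innerA (PySem.Int.floordiv n 16) (PySem.Int.mod n 16)
    if c < 16 then c else outerAGo fuel c

def outerA (n : Int) : Int := outerAGo (n.toNat + 1) n

-- bin(m)[2:] for m ≥ 0 is format(m, 'b') = PySem.Int.toBinChars;
-- int(x, 2) is PySem.Int.ofCharsBase? x 2 (.getD 0 is never taken: every chunk is a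
-- nonempty string of '0'/'1' digits, on which int(x, 2) returns a value).
def addChecksum (dataStr : String) : String :=
  let binStr : List Char :=
    (dataStr.toList.map (fun c => PySem.Int.toBinChars (c.toNat : Int))).flatten
  let binStr2 : List Char :=
    if binStr.length % 4 ≠ 0 then binStr ++ List.replicate (4 - binStr.length % 4) '0' else binStr
  let a_array : List Int :=
    (PySem.List.pyRange 0 (PySem.List.len binStr2) 4).foldl
      (fun acc i =>
        acc ++ [(PySem.Int.ofCharsBase? (PySem.List.slice binStr2 (some i) (some (i + 4))) 2).getD 0]) []
  let array_sum : Int := a_array.sum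
  let checksum : Int := outerA array_sum
  let csBits : List Char := PySem.Int.toBinChars (PySem.Int.bxor checksum 15)
  let csBits2 : List Char :=
    if csBits.length ≠ 4 then List.replicate (4 - csBits.length) '0' ++ csBits else csBits
  String.ofList (dataStr.toList ++ csBits2)

-- ===== PORT B =====
-- int.bit_length() for a nonnegative int (exact there; all arguments here are ≥ 0)
def bitLen (n : Nat) : Nat := if n = 0 then 0 else Nat.log2 n + 1

-- B's 'while n: s += n & 15; n >>= 4' loop
theorem pvshiftr4_lt (n : Nat) (h : n ≠ 0) : n >>> 4 < n :=
  Nat.shiftRight_eq_div_pow n 4 ▸ Nat.div_lt_self (Nat.pos_of_ne_zero h) (by norm_num)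

def hexSumB (n s : Nat) : Nat :=
  if h : n ≠ 0 then hexSumB (n >>> 4) (s + (n &&& 15)) else s
termination_by n
decreasing_by exact pvshiftr4_lt n h

-- format(x, '04b') for x ≥ 0: binary digits left-padded with '0' to width 4
def addChecksum_alt (dataStr : String) : String :=
  let p : Nat × Nat := dataStr.toList.foldl
    (fun (p : Nat × Nat) c => ((p.1 <<< bitLen c.toNat) ||| c.toNat, p.2 + bitLen c.toNat)) (0, 0)
  let pad : Nat := (4 - p.2 % 4) % 4
  let n : Nat := p.1 <<< pad
  let s : Nat := hexSumB n 0
  let checksum : Nat := if s = 0 then 0 else 1 + (s - 1) % 15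
  let bs : List Char := PySem.Int.toBinChars ((checksum ^^^ 15 : Nat) : Int)
  String.ofList (dataStr.toList ++ (List.replicate (4 - bs.length) '0' ++ bs))

-- ===== PRECONDITION & SPEC =====
def Spec_addChecksum (dataStr : String) (out : String) : Prop := out = addChecksum_alt dataStr
instance (dataStr : String) (out : String) : Decidable (Spec_addChecksum dataStr out) := by unfold Spec_addChecksum; infer_instance

-- ===== CLAIM (what is proved, stated in full; the proofs are below) =====
def Claim_equal_addChecksum : Prop := ∀ (dataStr : String), Dom_addChecksum dataStr → Spec_addChecksum dataStr (addChecksum dataStr)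

-- ===== LEMMAS AND PROOFS =====

-- binary digits of n (empty for 0): bin(n)[2:] without the 0-special-case
def binCore (n : Nat) : List Char :=
  if n = 0 then [] else binCore (n / 2) ++ [Nat.digitChar (n % 2)]
termination_by n
decreasing_by exact Nat.div_lt_self (Nat.pos_of_ne_zero (by assumption)) (by norm_num)

theorem toDigitsCore_eq : ∀ (f n : Nat) (acc : List Char), 0 < n → n < f →
    Nat.toDigitsCore 2 f n acc = binCore n ++ acc := by
  intro f
  induction f with
  | zero => omega
  | succ f ih =>
    intro n acc hn hf
    rw [binCore]
    simp only [Nat.toDigitsCore, if_neg (by omega : ¬ n = 0)]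
    by_cases h2 : n / 2 = 0
    · simp [h2, binCore]
    · rw [if_neg h2, ih (n / 2) _ (by omega) (by omega)]
      simp

theorem toBin_eq (n : Nat) (hn : 0 < n) : PySem.Int.toBinChars (n : Int) = binCore n := by
  rw [PySem.Int.toBinChars]
  rw [if_neg (by omega)]
  rw [Nat.toDigits]
  simp only [Int.toNat_natCast]
  rw [toDigitsCore_eq (n + 1) n [] hn (by omega)]
  simp

-- value of a big-endian list of binary digit characters
def bstep (a : Nat) (c : Char) : Nat := 2 * a + (if c = '1' then 1 else 0)
def natVal (bs : List Char) : Nat := bs.foldl bstep 0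

theorem valfold : ∀ (bs : List Char) (a : Nat), bs.foldl bstep a = a * 2 ^ bs.length + natVal bs := by
  intro bs
  induction bs with
  | nil => simp [natVal]
  | cons c t ih =>
    intro a
    have h1 : List.foldl bstep a (c :: t) = List.foldl bstep (bstep a c) t := rfl
    have h2 : natVal (c :: t) = List.foldl bstep (bstep 0 c) t := rfl
    rw [h1, h2, ih (bstep a c), ih (bstep 0 c)]
    simp only [bstep, List.length_cons, pow_succ]
    ring

theorem natVal_append (xs ys : List Char) :
    natVal (xs ++ ys) = natVal xs * 2 ^ ys.length + natVal ys := by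
  simp only [natVal, List.foldl_append]
  rw [valfold ys (List.foldl bstep 0 xs)]
  rfl

theorem natVal_lt (bs : List Char) : natVal bs < 2 ^ bs.length := by
  induction bs with
  | nil => simp [natVal]
  | cons c t ih =>
    have : natVal (c :: t) = (bstep 0 c) * 2 ^ t.length + natVal t := by
      show List.foldl bstep (bstep 0 c) t = _
      rw [valfold]
    rw [this]
    have : bstep 0 c ≤ 1 := by simp [bstep]; split <;> omega
    simp only [List.length_cons, pow_succ]
    nlinarith

theorem natVal_replicate_zero (k : Nat) : natVal (List.replicate k '0') = 0 := by
  induction k with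
  | zero => rfl
  | succ k ih =>
    rw [List.replicate_succ]
    have : natVal ('0' :: List.replicate k '0') = (bstep 0 '0') * 2 ^ k + natVal (List.replicate k '0') := by
      show List.foldl bstep (bstep 0 '0') (List.replicate k '0') = _
      rw [valfold, List.length_replicate]
    rw [this, ih]
    simp [bstep]

theorem natVal_pad (bs : List Char) (k : Nat) :
    natVal (bs ++ List.replicate k '0') = natVal bs * 2 ^ k := by
  rw [natVal_append, natVal_replicate_zero, List.length_replicate]
  omega

theorem natVal_binCore : ∀ n : Nat, natVal (binCore n) = n := by
  intro n
  induction n using Nat.strong_induction_on with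
  | _ n ih =>
    rw [binCore]
    by_cases h : n = 0
    · simp [h, natVal]
    · rw [if_neg h, natVal_append, ih (n / 2) (by omega)]
      have : natVal [Nat.digitChar (n % 2)] = n % 2 := by
        rcases Nat.mod_two_eq_zero_or_one n with h2 | h2 <;> rw [h2] <;> rfl
      rw [this]
      simp
      omega

theorem len_binCore : ∀ n : Nat, (binCore n).length = bitLen n := by
  intro n
  induction n using Nat.strong_induction_on with
  | _ n ih =>
    rw [binCore, bitLen]
    by_cases h : n = 0
    · simp [h]
    · rw [if_neg h, if_neg h]
      simp only [List.length_append, List.length_singleton]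
      by_cases h2 : n / 2 = 0
      · have h1 : n = 1 := by omega
        subst h1
        simp [binCore]
        decide
      · rw [ih (n / 2) (by omega), bitLen, if_neg h2]
        have : Nat.log2 n = Nat.log2 (n / 2) + 1 := by
          rw [Nat.log2_def]
          have h4 : 2 ≤ n := by omega
          simp [h4]
        omega

theorem chars_binCore : ∀ n : Nat, ∀ c ∈ binCore n, c = '0' ∨ c = '1' := by
  intro n
  induction n using Nat.strong_induction_on with
  | _ n ih =>
    rw [binCore]
    by_cases h : n = 0
    · simp [h]
    · rw [if_neg h]
      intro c hc
      rcases List.mem_append.mp hc with h1 | h1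
      · exact ih (n / 2) (by omega) c h1
      · rcases Nat.mod_two_eq_zero_or_one n with h2 | h2 <;>
          simp only [h2, List.mem_singleton] at h1 <;> subst h1 <;> [left; right] <;> decide

theorem lt_two_pow_bitLen (n : Nat) : n < 2 ^ bitLen n := by
  rw [← len_binCore]
  conv_lhs => rw [← natVal_binCore n]
  exact natVal_lt _

theorem lor_mul_pow (k : Nat) : ∀ a b : Nat, b < 2 ^ k → a * 2 ^ k ||| b = a * 2 ^ k + b := by
  induction k with
  | zero => intro a b hb; interval_cases b; simp
  | succ k ih =>
    intro a b hb
    have hb2 : b / 2 < 2 ^ k := by omega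
    have h1 : a * 2 ^ (k + 1) = Nat.bit false (a * 2 ^ k) := by
      simp [Nat.bit]; ring
    have h2 : b = Nat.bit (decide (b % 2 = 1)) (b / 2) := by
      rcases Nat.mod_two_eq_zero_or_one b with h | h <;> simp [Nat.bit, h] <;> omega
    rw [h1, h2, Nat.lor_bit, ih _ _ hb2]
    rcases Nat.mod_two_eq_zero_or_one b with h | h <;> simp [Nat.bit, h] <;> ring_nf

-- bits of a string: the concatenation of the binary digits of its character codes
def bitsOf (cs : List Char) : List Char := (cs.map (fun c => binCore c.toNat)).flatten

theorem foldB : ∀ (cs : List Char) (a l : Nat),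
    cs.foldl (fun (p : Nat × Nat) c => ((p.1 <<< bitLen c.toNat) ||| c.toNat, p.2 + bitLen c.toNat)) (a, l)
      = (a * 2 ^ (bitsOf cs).length + natVal (bitsOf cs), l + (bitsOf cs).length) := by
  intro cs
  induction cs with
  | nil => intro a l; simp [bitsOf, natVal]
  | cons c t ih =>
    intro a l
    simp only [List.foldl_cons]
    rw [ih]
    have hstep : (a <<< bitLen c.toNat) ||| c.toNat = a * 2 ^ bitLen c.toNat + c.toNat := by
      rw [Nat.shiftLeft_eq]
      exact lor_mul_pow _ _ _ (lt_two_pow_bitLen _)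
    have hbits : bitsOf (c :: t) = binCore c.toNat ++ bitsOf t := by
      simp [bitsOf]
    rw [hstep, hbits, natVal_append, natVal_binCore, List.length_append, len_binCore]
    simp only [Prod.mk.injEq]
    constructor
    · rw [pow_add]; ring
    · omega

-- base-16 digit sum
def hsum (n : Nat) : Nat :=
  if n = 0 then 0 else hsum (n / 16) + n % 16
termination_by n
decreasing_by exact Nat.div_lt_self (Nat.pos_of_ne_zero (by assumption)) (by norm_num)

theorem hsum_le : ∀ n : Nat, hsum n ≤ n := by
  intro n
  induction n using Nat.strong_induction_on with
  | _ n ih =>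
    rw [hsum]
    by_cases h : n = 0
    · simp [h]
    · rw [if_neg h]
      have := ih (n / 16) (by omega)
      omega

theorem hsum_mod15 : ∀ n : Nat, hsum n % 15 = n % 15 := by
  intro n
  induction n using Nat.strong_induction_on with
  | _ n ih =>
    rw [hsum]
    by_cases h : n = 0
    · simp [h]
    · rw [if_neg h]
      have := ih (n / 16) (by omega)
      omega

theorem hsum_pos : ∀ n : Nat, 0 < n → 0 < hsum n := by
  intro n
  induction n using Nat.strong_induction_on with
  | _ n ih =>
    intro hn
    rw [hsum, if_neg (by omega)]
    by_cases h : n % 16 = 0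
    · have := ih (n / 16) (by omega) (by omega)
      omega
    · omega

theorem hsum_lt (n : Nat) (h : 16 ≤ hsum n) : hsum n < n := by
  have h1 : hsum n ≤ n := hsum_le n
  have h2 : hsum n = hsum (n / 16) + n % 16 := by rw [hsum]; rw [if_neg (by omega)]
  have h3 := hsum_le (n / 16)
  omega

theorem hsum_step (v c : Nat) (hc : c < 16) : hsum (16 * v + c) = hsum v + c := by
  by_cases h : 16 * v + c = 0
  · have hv : v = 0 := by omega
    have hc0 : c = 0 := by omega
    subst hv; subst hc0; simp
  · rw [hsum, if_neg h]
    have h1 : (16 * v + c) / 16 = v := by omega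
    have h2 : (16 * v + c) % 16 = c := by omega
    rw [h1, h2]

theorem hexSumB_eq : ∀ n s : Nat, hexSumB n s = s + hsum n := by
  intro n
  induction n using Nat.strong_induction_on with
  | _ n ih =>
    intro s
    rw [hexSumB, hsum]
    by_cases h : n = 0
    · simp [h]
    · rw [dif_pos h]
      have hsr : n >>> 4 = n / 16 := by rw [Nat.shiftRight_eq_div_pow]
      have hand : n &&& 15 = n % 16 := by
        have := Nat.and_two_pow_sub_one_eq_mod n 4
        norm_num at this
        omega
      rw [hsr, hand, ih (n / 16) (by omega), if_neg h]
      omega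

theorem innerAGo_eq : ∀ (fuel q : Nat) (acc : Int), q ≤ fuel →
    innerAGo fuel (q : Int) acc = acc + (hsum q : Int) := by
  intro fuel
  induction fuel with
  | zero =>
    intro q acc hq
    have hq0 : q = 0 := by omega
    subst hq0
    have h0 : hsum 0 = 0 := by rw [hsum]; simp
    simp [innerAGo, h0]
  | succ f ih =>
    intro q acc hq
    by_cases h : q = 0
    · subst h
      have h0 : hsum 0 = 0 := by rw [hsum]; simp
      simp [innerAGo, h0]
    · have hpos : ((q : Int) > 0) := by exact_mod_cast Nat.pos_of_ne_zero h
      rw [innerAGo, if_pos hpos]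
      have h1 : PySem.Int.floordiv (q : Int) 16 = ((q / 16 : Nat) : Int) := by
        rw [PySem.Int.floordiv_eq_ediv_of_pos (by norm_num), Int.natCast_div]; norm_num
      have h2 : PySem.Int.mod (q : Int) 16 = ((q % 16 : Nat) : Int) := by
        rw [PySem.Int.mod_eq_emod_of_pos (by norm_num), Int.natCast_mod]; norm_num
      rw [h1, h2, ih (q / 16) _ (by omega)]
      have hs : hsum q = hsum (q / 16) + q % 16 := by rw [hsum, if_neg h]
      rw [hs]
      push_cast
      ring

theorem innerA_eq (q : Nat) (acc : Int) : innerA (q : Int) acc = acc + (hsum q : Int) := by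
  unfold innerA
  rw [Int.toNat_natCast]
  exact innerAGo_eq q q acc (le_refl q)

theorem outerAGo_eq : ∀ (fuel m : Nat), m < fuel →
    outerAGo fuel (m : Int) = ((if m = 0 then 0 else 1 + (m - 1) % 15 : Nat) : Int) := by
  intro fuel
  induction fuel with
  | zero => omega
  | succ f ih =>
    intro m hm
    rw [outerAGo]
    have h1 : PySem.Int.floordiv (m : Int) 16 = ((m / 16 : Nat) : Int) := by
      rw [PySem.Int.floordiv_eq_ediv_of_pos (by norm_num), Int.natCast_div]; norm_num
    have h2 : PySem.Int.mod (m : Int) 16 = ((m % 16 : Nat) : Int) := by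
      rw [PySem.Int.mod_eq_emod_of_pos (by norm_num), Int.natCast_mod]; norm_num
    have hc : innerA (PySem.Int.floordiv (m : Int) 16) (PySem.Int.mod (m : Int) 16) = (hsum m : Int) := by
      rw [h1, h2, innerA_eq]
      by_cases h : m = 0
      · subst h
        have h0 : hsum 0 = 0 := by rw [hsum]; simp
        simp [h0]
      · have hs : hsum m = hsum (m / 16) + m % 16 := by rw [hsum, if_neg h]
        rw [hs]
        push_cast
        ring
    simp only [hc]
    by_cases hlt : (hsum m : Int) < 16
    · rw [if_pos hlt]
      have hle : hsum m < 16 := by exact_mod_cast hlt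
      have hm15 := hsum_mod15 m
      by_cases h0 : m = 0
      · subst h0
        have hz : hsum 0 = 0 := by rw [hsum]; simp
        simp [hz]
      · rw [if_neg h0]
        have hp := hsum_pos m (Nat.pos_of_ne_zero h0)
        have : hsum m = 1 + (m - 1) % 15 := by omega
        exact_mod_cast congrArg (Nat.cast : Nat → Int) this
    · rw [if_neg hlt]
      have h16 : 16 ≤ hsum m := by omega
      have hlt2 := hsum_lt m h16
      rw [ih (hsum m) (by omega)]
      have hm0 : m ≠ 0 := by intro h; subst h; simp [hsum] at h16
      have hs0 : hsum m ≠ 0 := by omega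
      rw [if_neg hs0, if_neg hm0]
      have hm15 := hsum_mod15 m
      have : 1 + (hsum m - 1) % 15 = 1 + (m - 1) % 15 := by omega
      exact_mod_cast congrArg (Nat.cast : Nat → Int) this

theorem outerA_eq (m : Nat) : outerA (m : Int) = ((if m = 0 then 0 else 1 + (m - 1) % 15 : Nat) : Int) := by
  unfold outerA
  rw [Int.toNat_natCast]
  exact outerAGo_eq (m + 1) m (by omega)

-- int(x, 2) on a four-character binary string, by exhausting the 16 cases
theorem parse4 (a b c d : Char) (ha : a = '0' ∨ a = '1') (hb : b = '0' ∨ b = '1')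
    (hc : c = '0' ∨ c = '1') (hd : d = '0' ∨ d = '1') :
    (PySem.Int.ofCharsBase? [a, b, c, d] 2).getD 0 = (natVal [a, b, c, d] : Int) := by
  rcases ha with rfl | rfl <;> rcases hb with rfl | rfl <;> rcases hc with rfl | rfl <;>
    rcases hd with rfl | rfl <;> decide

theorem parse4' (cs : List Char) (h4 : cs.length = 4) (hb : ∀ c ∈ cs, c = '0' ∨ c = '1') :
    (PySem.Int.ofCharsBase? cs 2).getD 0 = (natVal cs : Int) := by
  match cs, h4 with
  | [a, b, c, d], _ =>
    exact parse4 a b c d (hb a (by simp)) (hb b (by simp)) (hb c (by simp)) (hb d (by simp))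

-- one 4-bit chunk of bs, parsed as A parses it
def chunkget (bs : List Char) (k : Nat) : Int :=
  (PySem.Int.ofCharsBase? ((bs.drop (4 * k)).take 4) 2).getD 0

theorem chunkSum : ∀ (K : Nat) (bs : List Char), bs.length = 4 * K →
    (∀ c ∈ bs, c = '0' ∨ c = '1') →
    ((List.range K).map (chunkget bs)).sum = (hsum (natVal bs) : Int) := by
  intro K
  induction K with
  | zero =>
    intro bs hl _
    have : bs = [] := List.eq_nil_of_length_eq_zero (by omega)
    subst this
    have h0 : hsum 0 = 0 := by rw [hsum]; simp
    simp [natVal, h0]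
  | succ K ih =>
    intro bs hl hb
    have hsplit : bs.take (4 * K) ++ bs.drop (4 * K) = bs := List.take_append_drop _ _
    have hinitlen : (bs.take (4 * K)).length = 4 * K := by simp; omega
    have hlastlen : (bs.drop (4 * K)).length = 4 := by simp; omega
    have hfirst : ∀ k ∈ List.range K, chunkget bs k = chunkget (bs.take (4 * K)) k := by
      intro k hk
      rw [List.mem_range] at hk
      unfold chunkget
      congr 1
      conv_lhs => rw [← hsplit]
      rw [List.drop_append_of_le_length (by omega)]
      rw [List.take_append_of_le_length (by simp; omega)]
    have hlast : chunkget bs K = (natVal (bs.drop (4 * K)) : Int) := by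
      unfold chunkget
      rw [List.take_of_length_le (by omega)]
      exact parse4' _ hlastlen (fun c hc => hb c (List.mem_of_mem_drop hc))
    rw [List.range_succ, List.map_append, List.sum_append, List.map_congr_left hfirst,
        ih (bs.take (4 * K)) hinitlen (fun c hc => hb c (List.mem_of_mem_take hc))]
    simp only [List.map_cons, List.map_nil, List.sum_cons, List.sum_nil, hlast]
    have hv : natVal bs = 16 * natVal (bs.take (4 * K)) + natVal (bs.drop (4 * K)) := by
      conv_lhs => rw [← hsplit]
      rw [natVal_append, hlastlen]
      ring
    have hlt : natVal (bs.drop (4 * K)) < 16 := by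
      have := natVal_lt (bs.drop (4 * K))
      rw [hlastlen] at this
      norm_num at this
      exact this
    rw [hv, hsum_step _ _ hlt]
    push_cast
    ring

-- final four characters: A's bin + conditional pad versus B's format(x, '04b'), for 0 ≤ c < 16
theorem tail16 (r : Nat) (h : r < 16) :
    (if (PySem.Int.toBinChars (PySem.Int.bxor (r : Int) 15)).length ≠ 4 then
        List.replicate (4 - (PySem.Int.toBinChars (PySem.Int.bxor (r : Int) 15)).length) '0' ++
          PySem.Int.toBinChars (PySem.Int.bxor (r : Int) 15)
      else PySem.Int.toBinChars (PySem.Int.bxor (r : Int) 15)) =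
    List.replicate (4 - (PySem.Int.toBinChars ((r ^^^ 15 : Nat) : Int)).length) '0' ++
      PySem.Int.toBinChars ((r ^^^ 15 : Nat) : Int) := by
  interval_cases r <;> decide

-- ===== VERDICT (by name: the statement is the Claim_ definition above) =====
theorem array_eq (P : List Char) (h4 : P.length % 4 = 0) (hb : ∀ c ∈ P, c = '0' ∨ c = '1') :
    (List.foldl (fun acc i =>
        acc ++ [(PySem.Int.ofCharsBase? (PySem.List.slice P (some i) (some (i + 4))) 2).getD 0]) []
      (PySem.List.pyRange 0 (PySem.List.len P) 4)).sum = (hsum (natVal P) : Int) := by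
  rw [PySem.List.foldl_append_singleton_eq_map]
  simp only [List.nil_append, PySem.List.len_eq]
  rw [PySem.List.pyRange_of_pos 0 (P.length : Int) (by norm_num : (0:Int) < (4:Int))]
  have hK : (if (0:Int) < (P.length : Int) then (((P.length : Int) - 0 + 4 - 1) / 4).toNat else 0)
      = P.length / 4 := by
    split <;> omega
  rw [hK, List.map_map]
  have hc : ∀ k ∈ List.range (P.length / 4),
      ((fun i => (PySem.Int.ofCharsBase? (PySem.List.slice P (some i) (some (i + 4))) 2).getD 0) ∘
        fun k : Nat => (0 : Int) + 4 * ↑k) k = chunkget P k := by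
    intro k hk
    simp only [Function.comp]
    have h1 : (0:Int) + 4 * (k:Int) = ((4 * k : Nat) : Int) := by push_cast; ring
    have h2 : ((4 * k : Nat) : Int) + 4 = ((4 * k : Nat) : Int) + ((4 : Nat) : Int) := by norm_num
    rw [h1, h2, PySem.List.slice_natCast_add]
    rfl
  rw [List.map_congr_left hc, chunkSum (P.length / 4) P (by omega) hb]

theorem main_eq (s : String) (hd : Dom_addChecksum s) : addChecksum s = addChecksum_alt s := by
  have hcode : ∀ c ∈ s.toList, 0 < c.toNat := by
    intro c hc
    unfold Dom_addChecksum pvDomStr at hd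
    rw [List.all_eq_true] at hd
    have := hd c hc
    unfold pvDomChar at this
    simp at this
    omega
  simp only [addChecksum, addChecksum_alt]
  rw [foldB]
  have hbitsA : (List.map (fun c => PySem.Int.toBinChars (c.toNat : Int)) s.toList).flatten
      = bitsOf s.toList := by
    unfold bitsOf
    congr 1
    exact List.map_congr_left (fun c hc => toBin_eq _ (hcode c hc))
  rw [hbitsA]
  simp only [zero_mul, zero_add]
  have hP : (if (bitsOf s.toList).length % 4 ≠ 0 then
        bitsOf s.toList ++ List.replicate (4 - (bitsOf s.toList).length % 4) '0'
      else bitsOf s.toList)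
      = bitsOf s.toList ++ List.replicate ((4 - (bitsOf s.toList).length % 4) % 4) '0' := by
    by_cases h : (bitsOf s.toList).length % 4 = 0
    · simp [h]
    · rw [if_pos h]
      have : (4 - (bitsOf s.toList).length % 4) % 4 = 4 - (bitsOf s.toList).length % 4 := by omega
      rw [this]
  rw [hP]
  have hbin : ∀ c ∈ bitsOf s.toList ++ List.replicate ((4 - (bitsOf s.toList).length % 4) % 4) '0',
      c = '0' ∨ c = '1' := by
    intro c hc
    rcases List.mem_append.mp hc with h | h
    · unfold bitsOf at h
      rcases List.mem_flatten.mp h with ⟨l, hl, hcl⟩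
      rcases List.mem_map.mp hl with ⟨ch, _, rfl⟩
      exact chars_binCore _ _ hcl
    · left; exact List.eq_of_mem_replicate h
  have hlen4 : (bitsOf s.toList ++ List.replicate ((4 - (bitsOf s.toList).length % 4) % 4) '0').length % 4
      = 0 := by
    simp only [List.length_append, List.length_replicate]
    omega
  rw [array_eq _ hlen4 hbin, outerA_eq]
  rw [Nat.shiftLeft_eq, ← natVal_pad, hexSumB_eq]
  simp only [Nat.zero_add]
  exact congrArg String.ofList (congrArg (s.toList ++ ·) (tail16 _ (by split <;> omega)))

theorem addChecksum_spec : Claim_equal_addChecksum := by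
  intro dataStr hd
  unfold Spec_addChecksum
  exact main_eq dataStr hd
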